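-- pv_equiv track=rewrite | github.com/RaramiP/PlayNet | src/utils/data_scrapping/make_dataset.py | remap_genres
-- ===== SOURCE A (Python) =====
-- KEEP_GENRES = [
--     'Action', 'Free To Play', 'Strategy', 'Adventure', 'Indie', 'RPG',
--     'Casual', 'Simulation', 'Racing', 'Massively Multiplayer', 'Sports'
-- ]
--
-- FINAL_GENRES = KEEP_GENRES + ['Other']
--
-- def remap_genres(original_genres: list[str]) -> dict[str, int]:
--     """Convert genre list to multi-hot dict with Other category."""
--     result = {genre: 0 for genre in FINAL_GENRES}
--
--     for genre in original_genres:
--         if genre in KEEP_GENRES: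
--             result[genre] = 1
--         else:
--             result['Other'] = 1
--
--     return result
-- ===== SOURCE B (Python) =====
-- KEEP_GENRES = [
--     'Action', 'Free To Play', 'Strategy', 'Adventure', 'Indie', 'RPG',
--     'Casual', 'Simulation', 'Racing', 'Massively Multiplayer', 'Sports'
-- ]
--
-- FINAL_GENRES = KEEP_GENRES + ['Other']
--
-- def remap_genres(original_genres: list[str]) -> dict[str, int]:
--     """Convert genre list to multi-hot dict with Other category.
--
--     Iterates over the fixed category list, querying a set built from the
--     input, instead of filling a zeroed dict by looping over the input."""
--     input_set = set(original_genres)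
--     result = {g: (1 if g in input_set else 0) for g in KEEP_GENRES}
--     result['Other'] = 1 if input_set.difference(KEEP_GENRES) else 0
--     return result
-- ===== Notes on version B (the rewrite author's own statement) =====
-- stated objective: idiomatic
-- what changed: B loops over the fixed category list and queries a set of the input (plus one existence check for the Other bucket), instead of A's zero-initialised dict filled by a loop over the input with a per-element list-membership scan.
import Mathlib
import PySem

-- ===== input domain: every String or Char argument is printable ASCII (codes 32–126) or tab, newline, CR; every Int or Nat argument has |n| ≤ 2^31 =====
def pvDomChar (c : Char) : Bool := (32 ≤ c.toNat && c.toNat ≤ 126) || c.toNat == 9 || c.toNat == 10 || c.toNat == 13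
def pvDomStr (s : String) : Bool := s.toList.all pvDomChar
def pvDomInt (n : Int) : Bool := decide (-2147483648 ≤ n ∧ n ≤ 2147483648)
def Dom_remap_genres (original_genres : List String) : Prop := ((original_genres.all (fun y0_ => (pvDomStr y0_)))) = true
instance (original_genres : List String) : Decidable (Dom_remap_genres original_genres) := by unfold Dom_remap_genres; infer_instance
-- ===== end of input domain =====

-- B iterates over the fixed category list querying a set of the input (with one existence
-- check for the Other bucket) instead of A's input-driven fill loop over a zeroed dict.


-- ===== PORT A =====
def KEEP_GENRES : List String :=
  ["Action", "Free To Play", "Strategy", "Adventure", "Indie", "RPG",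
   "Casual", "Simulation", "Racing", "Massively Multiplayer", "Sports"]

def FINAL_GENRES : List String := KEEP_GENRES ++ ["Other"]

def remap_genres (original_genres : List String) : List (String × Int) :=
  let result : PySem.Dict String Int :=
    FINAL_GENRES.foldl (fun d genre => d.insert genre 0) PySem.Dict.empty
  let result :=
    original_genres.foldl
      (fun d genre => if genre ∈ KEEP_GENRES then d.insert genre 1 else d.insert "Other" 1)
      result
  result.items

-- ===== PORT B =====
def remap_genres_alt (original_genres : List String) : List (String × Int) :=
  let inputSet : PySem.Set String := PySem.Set.ofList original_genres
  let result : PySem.Dict String Int :=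
    PySem.Dict.ofList (KEEP_GENRES.map (fun g => (g, if g ∈ inputSet then (1 : Int) else 0)))
  let result := result.insert "Other"
    (if PySem.Set.diff inputSet KEEP_GENRES ≠ [] then (1 : Int) else 0)
  result.items

-- ===== PRECONDITION & SPEC =====
def Spec_remap_genres (original_genres : List String) (out : List (String × Int)) : Prop := out = remap_genres_alt original_genres
instance (original_genres : List String) (out : List (String × Int)) : Decidable (Spec_remap_genres original_genres out) := by unfold Spec_remap_genres; infer_instance

-- ===== CLAIM (what is proved, stated in full; the proofs are below) =====
def Claim_equal_remap_genres : Prop := ∀ (original_genres : List String), Dom_remap_genres original_genres → Spec_remap_genres original_genres (remap_genres original_genres)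

-- ===== LEMMAS AND PROOFS =====

theorem other_not_keep : "Other" ∉ KEEP_GENRES := by decide

theorem mem_final_of_mem_keep {g : String} (h : g ∈ KEEP_GENRES) : g ∈ FINAL_GENRES :=
  List.mem_append_left _ h

theorem contains_final (v : String → Int) {x : String} (h : x ∈ FINAL_GENRES) :
    (PySem.Dict.mk (FINAL_GENRES.map (fun g => (g, v g)))).contains x = true := by
  rw [PySem.Dict.contains_mk]
  exact List.any_eq_true.mpr ⟨(x, v x), List.mem_map.mpr ⟨x, h, rfl⟩, by simp⟩

-- one step of A's fill loop, on a dict whose items are FINAL_GENRES with values v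
theorem stepA (v : String → Int) (x : String) :
    (if x ∈ KEEP_GENRES
      then (PySem.Dict.mk (FINAL_GENRES.map (fun g => (g, v g)))).insert x 1
      else (PySem.Dict.mk (FINAL_GENRES.map (fun g => (g, v g)))).insert "Other" 1)
    = PySem.Dict.mk (FINAL_GENRES.map (fun g =>
        (g, if (x ∈ KEEP_GENRES ∧ g = x) ∨ (x ∉ KEEP_GENRES ∧ g = "Other") then 1 else v g))) := by
  by_cases hx : x ∈ KEEP_GENRES
  · simp only [hx, if_pos]
    apply PySem.Dict.ext
    dsimp only
    rw [PySem.Dict.items_insert_of_contains _ _ (contains_final v (mem_final_of_mem_keep hx))]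
    rw [List.map_map]
    apply List.map_congr_left
    intro g _
    by_cases hgx : g = x
    · subst hgx; simp
    · simp [hgx, beq_iff_eq]
  · simp only [hx, if_false]
    apply PySem.Dict.ext
    dsimp only
    rw [PySem.Dict.items_insert_of_contains _ _
      (contains_final v (List.mem_append_right _ (by decide)))]
    rw [List.map_map]
    apply List.map_congr_left
    intro g _
    by_cases hgo : g = "Other"
    · subst hgo; simp
    · simp [hgo, beq_iff_eq]

theorem foldA (l : List String) (v : String → Int) :
    l.foldl
      (fun d genre => if genre ∈ KEEP_GENRES then d.insert genre 1 else d.insert "Other" 1)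
      (PySem.Dict.mk (FINAL_GENRES.map (fun g => (g, v g))))
    = PySem.Dict.mk (FINAL_GENRES.map (fun g =>
        (g, if (g ∈ KEEP_GENRES ∧ g ∈ l) ∨ (g = "Other" ∧ ∃ y ∈ l, y ∉ KEEP_GENRES)
            then 1 else v g))) := by
  induction l generalizing v with
  | nil => simp
  | cons x t ih =>
    rw [List.foldl_cons, stepA v x, ih]
    apply PySem.Dict.ext
    dsimp only
    apply List.map_congr_left
    intro g _
    congr 1
    by_cases hx : x ∈ KEEP_GENRES <;> by_cases hgx : g = x <;> split_ifs <;>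
      first | rfl | (exfalso; simp_all [List.mem_cons] <;> tauto)

theorem initA :
    FINAL_GENRES.foldl (fun d genre => d.insert genre 0) (PySem.Dict.empty : PySem.Dict String Int)
      = PySem.Dict.mk (FINAL_GENRES.map (fun g => (g, 0))) := by
  decide

theorem itemsB (l : List String) :
    remap_genres_alt l
    = KEEP_GENRES.map (fun g => (g, if g ∈ PySem.Set.ofList l then (1 : Int) else 0))
      ++ [("Other", if PySem.Set.diff (PySem.Set.ofList l) KEEP_GENRES ≠ [] then (1 : Int) else 0)] := by
  unfold remap_genres_alt
  have h1 : (PySem.Dict.ofList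
      (KEEP_GENRES.map (fun g => (g, if g ∈ PySem.Set.ofList l then (1 : Int) else 0)))).items
      = KEEP_GENRES.map (fun g => (g, if g ∈ PySem.Set.ofList l then (1 : Int) else 0)) := by
    have h := PySem.Dict.items_foldl_insert_fresh
      (KEEP_GENRES.map (fun g => (g, if g ∈ PySem.Set.ofList l then (1 : Int) else 0)))
      Prod.fst Prod.snd (PySem.Dict.empty)
      (fun a _ => rfl)
      (by rw [List.map_map]
          exact (by decide : ((fun g => g) <$> KEEP_GENRES).Nodup))
    simpa using h
  have h2 : (PySem.Dict.ofList
      (KEEP_GENRES.map (fun g => (g, if g ∈ PySem.Set.ofList l then (1 : Int) else 0)))).contains "Other" = false := by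
    rw [show (PySem.Dict.ofList
        (KEEP_GENRES.map (fun g => (g, if g ∈ PySem.Set.ofList l then (1 : Int) else 0))))
        = PySem.Dict.mk (KEEP_GENRES.map (fun g => (g, if g ∈ PySem.Set.ofList l then (1 : Int) else 0)))
      from PySem.Dict.ext h1]
    rw [PySem.Dict.contains_mk, List.any_map]
    refine List.any_eq_false.mpr ?_
    intro g hg
    have hne : g ≠ "Other" := fun h => other_not_keep (h ▸ hg)
    simpa using hne
  dsimp only
  rw [PySem.Dict.items_insert_of_not_contains _ _ h2, h1]

theorem diff_ne_nil_iff (l : List String) :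
    (PySem.Set.diff (PySem.Set.ofList l) KEEP_GENRES ≠ []) ↔ (∃ y ∈ l, y ∉ KEEP_GENRES) := by
  rw [Ne, List.eq_nil_iff_forall_not_mem]
  push Not
  constructor
  · rintro ⟨y, hy⟩
    rw [PySem.Set.mem_diff] at hy
    exact ⟨y, (PySem.Set.mem_ofList _ _).1 hy.1, hy.2⟩
  · rintro ⟨y, hy1, hy2⟩
    exact ⟨y, (PySem.Set.mem_diff _ _ _).2 ⟨(PySem.Set.mem_ofList _ _).2 hy1, hy2⟩⟩

-- ===== VERDICT (by name: the statement is the Claim_ definition above) =====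
theorem remap_genres_spec : Claim_equal_remap_genres := by
  intro l _
  unfold Spec_remap_genres
  rw [itemsB]
  unfold remap_genres
  dsimp only
  rw [initA, foldA]
  dsimp only
  rw [show FINAL_GENRES = KEEP_GENRES ++ ["Other"] from rfl, List.map_append]
  congr 1
  · apply List.map_congr_left
    intro g hg
    have hgo : g ≠ "Other" := fun h => other_not_keep (h ▸ hg)
    simp [hg, hgo, PySem.Set.mem_ofList]
  · simp [other_not_keep, diff_ne_nil_iff]
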